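-- pv_equiv track=rewrite | github.com/LPELCRACK896/DDL_labF | YALEX.py | __c_footer
-- ===== SOURCE A (Python) =====
-- def __c_footer(contenido):
--     j = len(contenido) - 1
--     while not j==-1:
--         line = contenido[j].strip()
--         if line:
--             if 'return' in line or '|' in line:return False
--             if line == "}" or "}" in line:return True
--         j -= 1
--     return False
-- ===== SOURCE B (Python) =====
-- def __c_footer(contenido):
--     result = False
--     for line in contenido:
--         line = line.strip()
--         if not line:
--             continue
--         if 'return' in line or '|' in line:
--             result = False
--         elif '}' in line:
--             result = True
--     return result
-- ===== Notes on version B (the rewrite author's own statement) =====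
-- stated objective: alternative
-- what changed: Replaces the backward index-based early-return scan with a single forward fold that keeps the verdict of the last marker-bearing line; the 'line == "}"' special case collapses into the '}' substring test.
import Mathlib
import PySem

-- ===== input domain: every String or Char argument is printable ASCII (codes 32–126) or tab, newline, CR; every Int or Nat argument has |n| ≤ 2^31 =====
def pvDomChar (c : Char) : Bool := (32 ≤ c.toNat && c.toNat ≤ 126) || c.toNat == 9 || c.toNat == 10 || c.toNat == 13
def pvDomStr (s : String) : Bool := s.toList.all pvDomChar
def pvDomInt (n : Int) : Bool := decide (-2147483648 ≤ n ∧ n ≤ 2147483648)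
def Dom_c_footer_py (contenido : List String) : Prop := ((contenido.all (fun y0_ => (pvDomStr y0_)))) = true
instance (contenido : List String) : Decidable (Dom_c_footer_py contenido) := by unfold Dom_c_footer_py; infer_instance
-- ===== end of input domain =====

-- B replaces A's backward index-based early-return scan by one forward fold keeping the last marker's verdict; same return value, alternative decomposition.

-- ===== PORT A =====
-- the while loop 'j = len-1; while not j == -1: …; j -= 1' as recursion on j+1;
-- contenido[j] is always in range here, so (pyGet? …).getD "" is exact
def c_footer_go (contenido : List String) : Nat → Bool
  | 0 => false
  | j + 1 =>
    let line := PySem.Str.strip ((PySem.List.pyGet? contenido (j : Int)).getD "")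
    if line == "" then c_footer_go contenido j
    else if PySem.Str.isIn "return" line || PySem.Str.isIn "|" line then false
    else if line == "}" || PySem.Str.isIn "}" line then true
    else c_footer_go contenido j

def c_footer_py (contenido : List String) : Bool :=
  c_footer_go contenido contenido.length

-- ===== PORT B =====
def c_footer_py_alt (contenido : List String) : Bool :=
  contenido.foldl (fun result line0 =>
    let line := PySem.Str.strip line0
    if line == "" then result
    else if PySem.Str.isIn "return" line || PySem.Str.isIn "|" line then false
    else if PySem.Str.isIn "}" line then true
    else result) false

-- ===== PRECONDITION & SPEC =====
def Spec_c_footer_py (contenido : List String) (out : Bool) : Prop := out = c_footer_py_alt contenido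
instance (contenido : List String) (out : Bool) : Decidable (Spec_c_footer_py contenido out) := by unfold Spec_c_footer_py; infer_instance

-- ===== CLAIM (what is proved, stated in full; the proofs are below) =====
def Claim_equal_c_footer_py : Prop := ∀ (contenido : List String), Dom_c_footer_py contenido → Spec_c_footer_py contenido (c_footer_py contenido)

-- ===== LEMMAS AND PROOFS =====

-- classification of one line: none = no marker (state unchanged), some v = the verdict it forces
def pvF (line0 : String) : Option Bool :=
  if PySem.Str.strip line0 == "" then none
  else if PySem.Str.isIn "return" (PySem.Str.strip line0) || PySem.Str.isIn "|" (PySem.Str.strip line0) then some false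
  else if PySem.Str.isIn "}" (PySem.Str.strip line0) then some true
  else none

theorem pv_brace_eq (line : String) :
    (line == "}" || PySem.Str.isIn "}" line) = PySem.Str.isIn "}" line := by
  by_cases h : line = "}"
  · subst h; decide
  · simp [h]

theorem pv_stepA (line0 : String) (k : Bool) :
    (let line := PySem.Str.strip line0
     if line == "" then k
     else if PySem.Str.isIn "return" line || PySem.Str.isIn "|" line then false
     else if line == "}" || PySem.Str.isIn "}" line then true
     else k) = (pvF line0).getD k := by
  show (if PySem.Str.strip line0 == "" then k
     else if PySem.Str.isIn "return" (PySem.Str.strip line0) || PySem.Str.isIn "|" (PySem.Str.strip line0) then false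
     else if PySem.Str.strip line0 == "}" || PySem.Str.isIn "}" (PySem.Str.strip line0) then true
     else k) = (pvF line0).getD k
  unfold pvF
  generalize PySem.Str.strip line0 = line
  rw [pv_brace_eq]
  split_ifs <;> simp

theorem pv_stepB (line0 : String) (k : Bool) :
    (let line := PySem.Str.strip line0
     if line == "" then k
     else if PySem.Str.isIn "return" line || PySem.Str.isIn "|" line then false
     else if PySem.Str.isIn "}" line then true
     else k) = (pvF line0).getD k := by
  show (if PySem.Str.strip line0 == "" then k
     else if PySem.Str.isIn "return" (PySem.Str.strip line0) || PySem.Str.isIn "|" (PySem.Str.strip line0) then false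
     else if PySem.Str.isIn "}" (PySem.Str.strip line0) then true
     else k) = (pvF line0).getD k
  unfold pvF
  split_ifs <;> simp

theorem pv_lemA (xs : List String) : ∀ j, j ≤ xs.length →
    c_footer_go xs j = ((xs.take j).reverse.findSome? pvF).getD false := by
  intro j
  induction j with
  | zero => intro _; simp [c_footer_go]
  | succ j ih =>
    intro hle
    have hj : j < xs.length := by omega
    have hget : (PySem.List.pyGet? xs (j : Int)).getD "" = xs[j] := by
      rw [PySem.List.pyGet?_natCast, List.getElem?_eq_getElem hj, Option.getD_some]
    have htake : xs.take (j + 1) = xs.take j ++ [xs[j]] := by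
      rw [List.take_add_one, List.getElem?_eq_getElem hj]
      rfl
    rw [c_footer_go]
    simp only [hget, ih (by omega)]
    rw [pv_stepA]
    rw [htake]
    simp only [List.reverse_append, List.reverse_singleton, List.singleton_append,
      List.findSome?_cons]
    cases hpv : pvF xs[j] <;> simp

theorem pv_lemB (xs : List String) : ∀ res : Bool,
    xs.foldl (fun result line0 =>
      let line := PySem.Str.strip line0
      if line == "" then result
      else if PySem.Str.isIn "return" line || PySem.Str.isIn "|" line then false
      else if PySem.Str.isIn "}" line then true
      else result) res = ((xs.reverse.findSome? pvF).getD res) := by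
  induction xs with
  | nil => intro res; simp
  | cons x xs ih =>
    intro res
    rw [List.foldl_cons, ih, List.reverse_cons, List.findSome?_append]
    rw [pv_stepB]
    cases hx : xs.reverse.findSome? pvF with
    | some v => simp
    | none =>
      simp only [Option.none_or, List.findSome?_cons, List.findSome?_nil]
      cases hpv : pvF x <;> simp

-- ===== VERDICT (by name: the statement is the Claim_ definition above) =====
theorem c_footer_py_spec : Claim_equal_c_footer_py := by
  intro contenido _
  unfold Spec_c_footer_py c_footer_py c_footer_py_alt
  rw [pv_lemA contenido contenido.length le_rfl, pv_lemB]
  simp
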